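-- pv_equiv track=rewrite | github.com/justinlietz93/neuroca | memory/lymphatic/abstractor.py | _find_common_elements
-- ===== SOURCE A (Python) =====
-- from typing import Dict, List, Optional, Set, Tuple, Union, Any
--
-- def _find_common_elements(lists: List[List[Any]]) -> List[Any]:
--     """
--     Find elements that appear in multiple lists.
--
--     Args:
--         lists: List of lists to analyze
--
--     Returns:
--         List of common elements sorted by frequency
--     """
--     if not lists:
--         return []
--
--     # Count occurrences of each element
--     counts = {}
--     for lst in lists:
--         for item in lst:
--             counts[item] = counts.get(item, 0) + 1
--
--     # Filter elements that appear in at least half of the lists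
--     threshold = max(1, len(lists) // 2)
--     common = [item for item, count in counts.items() if count >= threshold]
--
--     # Sort by frequency
--     return sorted(common, key=lambda x: counts[x], reverse=True)
-- ===== SOURCE B (Python) =====
-- def _find_common_elements(lists):
--     """
--     Find elements that appear in multiple lists.
--
--     Same contract as the original, but replaces the comparison sort with a
--     counting/bucket sort over frequencies.
--     """
--     if not lists:
--         return []
--
--     # Count occurrences of each element
--     counts = {}
--     for lst in lists:
--         for item in lst:
--             counts[item] = counts.get(item, 0) + 1
--
--     threshold = max(1, len(lists) // 2)
--
--     # Bucket qualifying elements by frequency (insertion order kept per bucket)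
--     buckets = {}
--     for item, count in counts.items():
--         if count >= threshold:
--             buckets.setdefault(count, []).append(item)
--
--     # Emit buckets from the highest frequency down to the threshold
--     max_count = max(counts.values(), default=0)
--     result = []
--     for count in range(max_count, threshold - 1, -1):
--         result.extend(buckets.get(count, []))
--     return result
-- ===== Notes on version B (the rewrite author's own statement) =====
-- stated objective: alternative
-- what changed: Replaces the comparison sort of the qualifying elements by a counting/bucket sort: elements are bucketed by their frequency in a dict and the buckets are emitted from the maximum frequency down to the threshold, which reproduces the stable reverse-sorted order.
import Mathlib
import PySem

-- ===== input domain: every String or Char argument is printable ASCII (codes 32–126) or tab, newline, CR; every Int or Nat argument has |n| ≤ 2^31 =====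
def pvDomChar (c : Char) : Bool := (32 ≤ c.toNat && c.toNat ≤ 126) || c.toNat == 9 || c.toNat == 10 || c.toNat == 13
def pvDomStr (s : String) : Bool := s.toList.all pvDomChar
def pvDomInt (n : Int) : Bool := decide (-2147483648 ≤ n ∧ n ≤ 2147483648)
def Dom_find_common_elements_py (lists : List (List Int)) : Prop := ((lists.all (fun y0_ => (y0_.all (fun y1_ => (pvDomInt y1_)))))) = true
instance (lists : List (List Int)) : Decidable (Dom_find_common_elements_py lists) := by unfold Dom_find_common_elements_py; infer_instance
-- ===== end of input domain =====

-- B replaces A's comparison sort by a counting/bucket sort over frequencies (same return value; objective: alternative algorithm).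

-- ===== PORT A =====
def find_common_elements_py (lists : List (List Int)) : List Int :=
  if lists = [] then []
  else
    let counts : PySem.Dict Int Int :=
      lists.foldl (fun counts lst =>
        lst.foldl (fun counts item => counts.insert item (counts.getD item 0 + 1)) counts)
        PySem.Dict.empty
    let threshold : Int := max 1 (PySem.Int.floordiv (PySem.List.len lists) 2)
    let common : List Int := (counts.items.filter (fun p => decide (threshold ≤ p.2))).map (fun p => p.1)
    PySem.List.sorted common (fun x => counts.getD x 0) true

-- ===== PORT B =====
def find_common_elements_py_alt (lists : List (List Int)) : List Int :=
  if lists = [] then []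
  else
    let counts : PySem.Dict Int Int :=
      lists.foldl (fun counts lst =>
        lst.foldl (fun counts item => counts.insert item (counts.getD item 0 + 1)) counts)
        PySem.Dict.empty
    let threshold : Int := max 1 (PySem.Int.floordiv (PySem.List.len lists) 2)
    let buckets : PySem.Dict Int (List Int) :=
      counts.items.foldl (fun buckets p =>
        if threshold ≤ p.2 then buckets.modify p.2 [] (· ++ [p.1]) else buckets)
        PySem.Dict.empty
    let max_count : Int := PySem.List.maxD counts.values (fun v => v) 0
    (PySem.List.pyRange max_count (threshold - 1) (-1)).foldl
      (fun result c => result ++ buckets.getD c []) []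

-- ===== PRECONDITION & SPEC =====
def Spec_find_common_elements_py (lists : List (List Int)) (out : List Int) : Prop := out = find_common_elements_py_alt lists
instance (lists : List (List Int)) (out : List Int) : Decidable (Spec_find_common_elements_py lists out) := by unfold Spec_find_common_elements_py; infer_instance

-- ===== CLAIM (what is proved, stated in full; the proofs are below) =====
def Claim_equal_find_common_elements_py : Prop := ∀ (lists : List (List Int)), Dom_find_common_elements_py lists → Spec_find_common_elements_py lists (find_common_elements_py lists)

-- ===== LEMMAS AND PROOFS =====

theorem pyRange_neg_one (a b : Int) :
    PySem.List.pyRange a b (-1) =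
      (List.range (if b < a then (a - b).toNat else 0)).map (fun (k : Nat) => a - (k : Int)) := by
  simp only [PySem.List.pyRange]
  rw [if_neg (by norm_num : ¬((-1:Int) = 0)), if_neg (by norm_num : ¬((0:Int) < -1))]
  have h1 : (a - b + -(-1) - 1) / -(-1 : Int) = a - b := by norm_num
  rw [h1]
  apply List.map_congr_left
  intro k _
  ring

theorem mem_pyRange_neg_one {a b x : Int} :
    x ∈ PySem.List.pyRange a b (-1) ↔ b < x ∧ x ≤ a := by
  rw [pyRange_neg_one]
  simp only [List.mem_map, List.mem_range]
  constructor
  · rintro ⟨k, hk, rfl⟩; split_ifs at hk with h <;> omega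
  · rintro ⟨h1, h2⟩
    refine ⟨(a - x).toNat, ?_, by omega⟩
    split_ifs with h <;> omega

theorem pairwise_gt_pyRange_neg_one (a b : Int) :
    (PySem.List.pyRange a b (-1)).Pairwise (fun c d => d < c) := by
  rw [pyRange_neg_one]
  exact List.Pairwise.map _ (fun h => by omega) (List.pairwise_lt_range)

theorem insertBy_append_left {α : Type} (before : α → α → Bool) (x : α) (ys zs : List α)
    (h : ∀ y ∈ ys, before x y = false) :
    PySem.List.insertBy before x (ys ++ zs) = ys ++ PySem.List.insertBy before x zs := by
  induction ys with
  | nil => simp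
  | cons y t ih =>
    have hy := h y (by simp)
    simp only [List.cons_append, PySem.List.insertBy, hy]
    simp only [Bool.false_eq_true]
    rw [ih (fun z hz => h z (by simp [hz]))]
    simp

theorem insertBy_eq_cons {α : Type} (before : α → α → Bool) (x : α) (zs : List α)
    (h : ∀ z ∈ zs, before x z = true) :
    PySem.List.insertBy before x zs = x :: zs := by
  cases zs with
  | nil => simp [PySem.List.insertBy]
  | cons z t => simp [PySem.List.insertBy, h z (by simp)]

theorem insertBy_flatMap_step {α : Type} (key : α → Int) (x : α) (p : List α) (cs : List Int)
    (hcs : cs.Pairwise (fun c d => d < c)) (hx : key x ∈ cs) :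
    PySem.List.insertBy (fun a b => decide (key b < key a)) x
        (cs.flatMap (fun c => p.filter (fun y => decide (key y = c))))
      = cs.flatMap (fun c => (p ++ [x]).filter (fun y => decide (key y = c))) := by
  induction cs with
  | nil => simp at hx
  | cons c cs' ih =>
    have hlt : ∀ d ∈ cs', d < c := fun d hd => (List.pairwise_cons.mp hcs).1 d hd
    have hcs' := (List.pairwise_cons.mp hcs).2
    simp only [List.flatMap_cons]
    by_cases h : key x = c
    · -- x belongs to the first bucket
      rw [insertBy_append_left _ _ _ _ (fun y hy => ?_)]
      · rw [insertBy_eq_cons _ _ _ (fun z hz => ?_)]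
        · -- assemble
          have h1 : (p ++ [x]).filter (fun y => decide (key y = c))
              = p.filter (fun y => decide (key y = c)) ++ [x] := by
            simp [List.filter_append, h]
          have h2 : cs'.flatMap (fun c' => (p ++ [x]).filter (fun y => decide (key y = c')))
              = cs'.flatMap (fun c' => p.filter (fun y => decide (key y = c'))) := by
            apply List.flatMap_congr
            intro c' hc'
            have : key x ≠ c' := by have := hlt c' hc'; omega
            simp [List.filter_append, this]
          rw [h1, h2]; simp
        · -- every element of the tail flatMap has key < key x
          simp only [List.mem_flatMap, List.mem_filter, decide_eq_true_eq] at hz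
          obtain ⟨c', hc', _, hkz⟩ := hz
          have := hlt c' hc'
          simp [hkz, h]; omega
      · -- first bucket: keys equal, not before
        simp only [List.mem_filter, decide_eq_true_eq] at hy
        simp [hy.2, h]
    · -- x belongs to a later bucket
      have hx' : key x ∈ cs' := by rcases List.mem_cons.mp hx with h' | h' <;> [exact absurd h' h; exact h']
      have hkx : key x < c := hlt _ hx'
      rw [insertBy_append_left _ _ _ _ (fun y hy => ?_)]
      · rw [ih hcs' hx']
        have h1 : (p ++ [x]).filter (fun y => decide (key y = c))
            = p.filter (fun y => decide (key y = c)) := by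
          simp [List.filter_append, h]
        rw [h1]
      · simp only [List.mem_filter, decide_eq_true_eq] at hy
        simp [hy.2]; omega

theorem sorted_rev_eq_flatMap {α : Type} (key : α → Int) (xs : List α) (cs : List Int)
    (hcs : cs.Pairwise (fun c d => d < c)) (hmem : ∀ x ∈ xs, key x ∈ cs) :
    PySem.List.sorted xs key true
      = cs.flatMap (fun c => xs.filter (fun y => decide (key y = c))) := by
  rw [PySem.List.sorted_rev_eq_foldl_insertBy]
  suffices h : ∀ (ys : List α) (p : List α), (∀ x ∈ ys, key x ∈ cs) →
      ys.foldl (fun acc x => PySem.List.insertBy (fun a b => decide (key b < key a)) x acc)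
        (cs.flatMap (fun c => p.filter (fun y => decide (key y = c))))
      = cs.flatMap (fun c => (p ++ ys).filter (fun y => decide (key y = c))) by
    have := h xs [] hmem
    simp only [List.filter_nil, List.nil_append] at this ⊢
    rw [show (List.flatMap (fun c => ([]:List α)) cs) = [] by simp] at this
    exact this
  intro ys
  induction ys with
  | nil => intro p _; simp
  | cons y t ih =>
    intro p hy
    simp only [List.foldl_cons]
    rw [insertBy_flatMap_step key y p cs hcs (hy y (by simp))]
    rw [ih (p ++ [y]) (fun z hz => hy z (by simp [hz]))]
    simp

theorem buckets_getD (items : List (Int × Int)) (thr c : Int) :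
    (items.foldl (fun (d : PySem.Dict Int (List Int)) p =>
        if thr ≤ p.2 then d.modify p.2 [] (· ++ [p.1]) else d) PySem.Dict.empty).getD c []
    = ((items.filter (fun p => decide (thr ≤ p.2))).filter (fun p => p.2 == c)).map (·.1) := by
  rw [PySem.List.foldl_ite_eq_foldl_filter (fun p : Int × Int => thr ≤ p.2) (fun (d : PySem.Dict Int (List Int)) p => d.modify p.2 [] (· ++ [p.1])) items PySem.Dict.empty]
  have hswap : ∀ (L : List (Int × Int)),
      L.foldl (fun (d : PySem.Dict Int (List Int)) p => d.modify p.2 [] (· ++ [p.1])) PySem.Dict.empty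
      = (L.map Prod.swap).foldl (fun d p => d.modify p.1 [] (· ++ [p.2])) PySem.Dict.empty := by
    intro L; rw [List.foldl_map]; rfl
  rw [hswap, PySem.Dict.getD_foldl_modify_append, PySem.Dict.getD_empty]
  rw [List.filter_map]
  simp [List.map_map, Function.comp_def]

theorem le_maxD_values (flat : List Int) (x : Int) (hx : x ∈ PySem.Set.ofList flat) :
    ((List.count x flat : Int)) ≤ PySem.List.maxD (PySem.Dict.counter flat).values (fun v => v) 0 := by
  have hv : ((List.count x flat : Int)) ∈ (PySem.Dict.counter flat).values := by
    have h2 : (PySem.Dict.counter flat).values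
        = (PySem.Set.ofList flat).map (fun k => ((List.count k flat : Int))) := by
      show ((PySem.Dict.counter flat).items.map (·.2)) = _
      rw [PySem.Dict.items_counter, List.map_map]
      rfl
    rw [h2]
    exact List.mem_map_of_mem hx
  cases h : PySem.List.max? (PySem.Dict.counter flat).values (fun v => v) with
  | none =>
    rw [PySem.List.max?_eq_none_iff] at h
    rw [h] at hv; simp at hv
  | some m =>
    have := PySem.List.max?_isMax h _ hv
    unfold PySem.List.maxD
    rw [h]
    simpa using this

-- ===== VERDICT (by name: the statement is the Claim_ definition above) =====
theorem find_common_elements_py_spec : Claim_equal_find_common_elements_py := by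
  intro lists _
  unfold Spec_find_common_elements_py
  by_cases hnil : lists = []
  · subst hnil; rfl
  · unfold find_common_elements_py find_common_elements_py_alt
    rw [if_neg hnil, if_neg hnil]
    have hcounts : lists.foldl (fun counts lst => lst.foldl (fun c item => c.insert item (c.getD item 0 + 1)) counts) PySem.Dict.empty = PySem.Dict.counter lists.flatten := by
      rw [← List.foldl_flatten]
      exact PySem.Dict.foldl_insert_getD_add_one_eq_counter _
    simp only [hcounts]
    rw [PySem.List.foldl_append_eq_flatMap, List.nil_append]
    simp only [buckets_getD]
    rw [PySem.Dict.items_counter]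
    have hkey : (fun x : Int => (PySem.Dict.counter lists.flatten).getD x 0)
        = (fun x : Int => ((List.count x lists.flatten : Int))) := by
      funext x; exact PySem.Dict.getD_counter _ _
    rw [hkey]
    have hcommon : List.map (fun p => p.1)
        (List.filter (fun p => decide (max 1 (PySem.Int.floordiv (PySem.List.len lists) 2) ≤ p.2))
          (List.map (fun k => (k, ((List.count k lists.flatten : Int)))) (PySem.Set.ofList lists.flatten)))
        = List.filter
            (fun k => decide (max 1 (PySem.Int.floordiv (PySem.List.len lists) 2) ≤ (List.count k lists.flatten : Int)))
            (PySem.Set.ofList lists.flatten) := by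
      rw [List.filter_map, List.map_map]
      simp [Function.comp_def]
    rw [hcommon]
    rw [sorted_rev_eq_flatMap (fun x : Int => ((List.count x lists.flatten : Int))) _
      (PySem.List.pyRange (PySem.List.maxD (PySem.Dict.counter lists.flatten).values (fun v => v) 0)
        (max 1 (PySem.Int.floordiv (PySem.List.len lists) 2) - 1) (-1))
      (pairwise_gt_pyRange_neg_one _ _) ?hmem]
    case hmem =>
      intro x hx
      rw [List.mem_filter] at hx
      rw [mem_pyRange_neg_one]
      refine ⟨?_, le_maxD_values _ _ hx.1⟩
      have h2 := of_decide_eq_true hx.2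
      beta_reduce
      omega
    apply List.flatMap_congr
    intro c hc
    rw [List.filter_map, List.filter_map, List.map_map, List.filter_filter, List.filter_filter]
    have : (fun k : Int => decide ((List.count k lists.flatten : Int) = c) &&
          decide (max 1 (PySem.Int.floordiv (PySem.List.len lists) 2) ≤ (List.count k lists.flatten : Int)))
        = (fun k : Int => ((fun p : Int × Int => p.2 == c) ∘ fun k => (k, ((List.count k lists.flatten : Int)))) k &&
          ((fun p : Int × Int => decide (max 1 (PySem.Int.floordiv (PySem.List.len lists) 2) ≤ p.2)) ∘ fun k => (k, ((List.count k lists.flatten : Int)))) k) := by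
      funext k
      by_cases h1 : (List.count k lists.flatten : Int) = c <;> simp [h1]
    rw [this]
    simp [Function.comp_def]
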